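-- pv_equiv track=rewrite | github.com/MenxLi/Lires | resbibman/backend/fileTools.py | strSubstitute
-- ===== SOURCE A (Python) =====
-- def strSubstitute(string: str):
--     substitute_table = {
--         " ": "_",
--         ",":"^",
--         ":":"",
--         "/":"-",
--         "\\":"-"
--     }
--     for k, v in substitute_table.items():
--         string = string.replace(k, v)
--     return string
-- ===== SOURCE B (Python) =====
-- def strSubstitute(string: str):
--     out = []
--     for c in string:
--         if c == ' ':
--             out.append('_')
--         elif c == ',':
--             out.append('^')
--         elif c == ':':
--             pass  # dropped
--         elif c == '/' or c == '\\':
--             out.append('-')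
--         else:
--             out.append(c)
--     return ''.join(out)
-- ===== Notes on version B (the rewrite author's own statement) =====
-- stated objective: alternative
-- what changed: Instead of five full table-driven str.replace scans, B makes a single explicit loop over the input characters with an if/elif chain appending each character's substitution (or skipping ':') to an output list, then joins it.
import Mathlib
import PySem

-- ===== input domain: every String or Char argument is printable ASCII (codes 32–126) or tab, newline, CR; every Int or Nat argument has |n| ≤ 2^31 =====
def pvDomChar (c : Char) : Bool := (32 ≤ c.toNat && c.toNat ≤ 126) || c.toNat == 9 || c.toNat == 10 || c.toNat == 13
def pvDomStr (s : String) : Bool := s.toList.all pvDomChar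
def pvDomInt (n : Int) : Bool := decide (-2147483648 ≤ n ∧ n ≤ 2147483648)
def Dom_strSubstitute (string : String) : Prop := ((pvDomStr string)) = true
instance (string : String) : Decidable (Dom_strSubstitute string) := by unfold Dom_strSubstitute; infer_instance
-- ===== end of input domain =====

-- B replaces A's five table-driven str.replace scans by one explicit loop over the
-- input characters with an if/elif chain building the output list (same result).

-- ===== PORT A =====
-- the dict literal of A, as an association list in insertion order
def pvTableA : PySem.Dict String String :=
  ⟨[(" ", "_"), (",", "^"), (":", ""), ("/", "-"), ("\\", "-")]⟩

def strSubstitute (string : String) : String :=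
  pvTableA.items.foldl (fun s kv => PySem.Str.replace s kv.1 kv.2) string

-- ===== PORT B =====
-- the loop body: out.append(...) / pass per the if/elif chain of Source B
def pvStepB (out : List Char) (c : Char) : List Char :=
  if c = ' ' then out ++ ['_']
  else if c = ',' then out ++ ['^']
  else if c = ':' then out
  else if c = '/' ∨ c = '\\' then out ++ ['-']
  else out ++ [c]

def strSubstitute_alt (string : String) : String :=
  String.ofList (string.toList.foldl pvStepB [])

-- ===== PRECONDITION & SPEC =====
def Spec_strSubstitute (string : String) (out : String) : Prop := out = strSubstitute_alt string
instance (string : String) (out : String) : Decidable (Spec_strSubstitute string out) := by unfold Spec_strSubstitute; infer_instance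

-- ===== CLAIM (what is proved, stated in full; the proofs are below) =====
def Claim_equal_strSubstitute : Prop := ∀ (string : String), Dom_strSubstitute string → Spec_strSubstitute string (strSubstitute string)

-- ===== LEMMAS AND PROOFS =====

-- the per-character substitution both programs realise
def pvSub (c : Char) : List Char :=
  if c = ' ' then ['_'] else if c = ',' then ['^'] else if c = ':' then []
  else if c = '/' then ['-'] else if c = '\\' then ['-'] else [c]

lemma go_single (k : Char) (v : List Char) :
    ∀ (fuel : Nat) (l acc : List Char), l.length ≤ fuel →
      PySem.Chars.replace.go [k] v fuel l acc
        = acc.reverse ++ l.flatMap (fun c => if c = k then v else [c])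
  | fuel, [], acc, _ => by cases fuel <;> simp [PySem.Chars.replace.go]
  | 0, c :: t, acc, h => by simp at h
  | fuel + 1, c :: t, acc, h => by
      rw [PySem.Chars.replace.go]
      simp only [List.isPrefixOf, List.flatMap_cons]
      by_cases hk : k = c
      · subst hk
        simp only [BEq.rfl, Bool.true_and, if_pos]
        have hd : List.drop [k].length (k :: t) = t := rfl
        rw [hd, go_single k v fuel t (v.reverse ++ acc) (by simpa using Nat.le_of_succ_le_succ h)]
        simp
      · have hk' : (k == c) = false := beq_eq_false_iff_ne.mpr hk
        simp only [hk', Bool.false_and, Bool.false_eq_true, if_false]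
        rw [go_single k v fuel t (c :: acc) (by simpa using Nat.le_of_succ_le_succ h)]
        rw [if_neg (fun hc : c = k => hk hc.symm)]
        simp

lemma replace_single (s : List Char) (k : Char) (v : List Char) :
    PySem.Chars.replace s [k] v = s.flatMap (fun c => if c = k then v else [c]) := by
  rw [PySem.Chars.replace]
  simp only [List.isEmpty_cons, Bool.false_eq_true, if_false]
  rw [go_single k v s.length s [] le_rfl]
  simp

lemma chain_eq (cs : List Char) :
    ((((cs.flatMap (fun c => if c = ' ' then ['_'] else [c])).flatMap
        (fun c => if c = ',' then ['^'] else [c])).flatMap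
        (fun c => if c = ':' then ([] : List Char) else [c])).flatMap
        (fun c => if c = '/' then ['-'] else [c])).flatMap
        (fun c => if c = '\\' then ['-'] else [c]) = cs.flatMap pvSub := by
  induction cs with
  | nil => simp
  | cons c t ih =>
      simp only [List.flatMap_cons, List.flatMap_append, ih]
      congr 1
      by_cases h1 : c = ' '
      · subst h1; decide
      by_cases h2 : c = ','
      · subst h2; decide
      by_cases h3 : c = ':'
      · subst h3; decide
      by_cases h4 : c = '/'
      · subst h4; decide
      by_cases h5 : c = '\\'
      · subst h5; decide
      simp [pvSub, h1, h2, h3, h4, h5]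

lemma stepB_eq (out : List Char) (c : Char) : pvStepB out c = out ++ pvSub c := by
  simp only [pvStepB, pvSub]
  by_cases h1 : c = ' '
  · simp [h1]
  by_cases h2 : c = ','
  · simp [h2]
  by_cases h3 : c = ':'
  · simp [h3]
  by_cases h4 : c = '/'
  · simp [h4]
  by_cases h5 : c = '\\'
  · simp [h5]
  simp [h1, h2, h3, h4, h5]

lemma alt_toList (s : String) :
    (strSubstitute_alt s).toList = s.toList.flatMap pvSub := by
  rw [strSubstitute_alt, String.toList_ofList]
  have : s.toList.foldl pvStepB [] = s.toList.foldl (fun out c => out ++ pvSub c) [] :=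
    List.foldl_ext pvStepB (fun out c => out ++ pvSub c) [] (fun acc x _ => stepB_eq acc x)
  rw [this, PySem.List.foldl_append_eq_flatMap]
  simp

-- ===== VERDICT (by name: the statement is the Claim_ definition above) =====
theorem strSubstitute_spec : Claim_equal_strSubstitute := by
  intro s _
  unfold Spec_strSubstitute
  rw [← String.toList_inj]
  rw [alt_toList]
  simp only [strSubstitute, pvTableA, List.foldl, PySem.Str.replace, String.toList_ofList]
  simp only [show (" " : String).toList = [' '] from rfl,
    show ("," : String).toList = [','] from rfl,
    show (":" : String).toList = [':'] from rfl,
    show ("/" : String).toList = ['/'] from rfl,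
    show ("\\" : String).toList = ['\\'] from rfl,
    show ("_" : String).toList = ['_'] from rfl,
    show ("^" : String).toList = ['^'] from rfl,
    show ("-" : String).toList = ['-'] from rfl,
    show ("" : String).toList = ([] : List Char) from rfl]
  rw [replace_single, replace_single, replace_single, replace_single, replace_single]
  exact chain_eq s.toList
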